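-- pv_equiv track=rewrite | github.com/FalconLi/2048_with_special_rules | allfunctions_2048.py | compress_right
-- ===== SOURCE A (Python) =====
-- def compress_right(board):
--     validity = False
--     new_board = [[0, 0, 0, 0], [0, 0, 0, 0], [0, 0, 0, 0], [0, 0, 0, 0]]
--     for i in range (4):
--         position = 3
--         for j in range (3, -1, -1):
--             if (board[i][j] != 0):
--                 new_board[i][position] = board[i][j]
--                 if j != position:
--                     validity = True
--                 position -= 1
--     return new_board, validity
-- ===== SOURCE B (Python) =====
-- def compress_right(board):
--     new_board = []
--     for i in range(4):
--         nz = [x for x in board[i][:4] if x != 0]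
--         new_board.append([0] * (4 - len(nz)) + nz)
--     validity = any(new_board[i] != board[i][:4] for i in range(4))
--     return new_board, validity
-- ===== Notes on version B (the rewrite author's own statement) =====
-- stated objective: simpler
-- what changed: Replaces the right-to-left destination-pointer placement with inline per-move flag by a collect-nonzeros-then-pad phase per row, with validity recomputed as a whole-row comparison against the original row.
import Mathlib
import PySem

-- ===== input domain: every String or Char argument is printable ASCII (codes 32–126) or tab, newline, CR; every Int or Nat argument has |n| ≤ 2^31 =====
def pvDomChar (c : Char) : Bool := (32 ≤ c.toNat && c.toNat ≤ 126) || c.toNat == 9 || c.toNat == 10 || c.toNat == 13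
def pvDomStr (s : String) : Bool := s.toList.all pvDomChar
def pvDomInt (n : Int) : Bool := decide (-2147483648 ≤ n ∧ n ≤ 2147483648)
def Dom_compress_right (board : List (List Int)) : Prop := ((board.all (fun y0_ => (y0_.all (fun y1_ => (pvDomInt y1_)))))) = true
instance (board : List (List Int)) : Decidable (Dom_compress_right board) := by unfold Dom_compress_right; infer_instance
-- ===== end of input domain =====

-- B replaces A's right-to-left destination-pointer placement (inline per-move flag) by a
-- collect-nonzeros-then-pad phase per row, with validity recomputed as a whole-row comparison.

-- ===== PORT A =====
-- body of the inner 'for j in range(3, -1, -1)' loop; state = (new_board, position, validity)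
def stepA (board : List (List Int)) (i : Int) (st2 : List (List Int) × Int × Bool) (j : Int) :
    List (List Int) × Int × Bool :=
  let v := PySem.List.pyGetD (PySem.List.pyGetD board i []) j 0   -- board[i][j]
  if v ≠ 0 then
    -- new_board[i][position] = board[i][j]  (read row i, set entry, write row i back)
    (PySem.List.pySetD st2.1 i (PySem.List.pySetD (PySem.List.pyGetD st2.1 i []) st2.2.1 v),
     st2.2.1 - 1,
     if j ≠ st2.2.1 then true else st2.2.2)
  else st2

def innerA (board : List (List Int)) (i : Int) (nb : List (List Int)) (validity : Bool) :
    List (List Int) × Bool :=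
  let r := (PySem.List.pyRange 3 (-1) (-1)).foldl (stepA board i) (nb, (3 : Int), validity)
  (r.1, r.2.2)

def compress_right (board : List (List Int)) : List (List Int) × Bool :=
  (PySem.List.pyRange 0 4 1).foldl (fun st i => innerA board i st.1 st.2)
    ([[0, 0, 0, 0], [0, 0, 0, 0], [0, 0, 0, 0], [0, 0, 0, 0]], false)

-- ===== PORT B =====
-- one compressed row: nz = [x for x in row[:4] if x != 0]; [0] * (4 - len(nz)) + nz
def altRow (row : List Int) : List Int :=
  let nz := (PySem.List.slice row (some 0) (some 4)).filter (fun x => decide (x ≠ 0))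
  PySem.List.pyRepeat [0] (4 - PySem.List.len nz) ++ nz

def compress_right_alt (board : List (List Int)) : List (List Int) × Bool :=
  let new_board := (PySem.List.pyRange 0 4 1).map (fun i => altRow (PySem.List.pyGetD board i []))
  let validity := (PySem.List.pyRange 0 4 1).any (fun i =>
    !decide (PySem.List.pyGetD new_board i []
              = PySem.List.slice (PySem.List.pyGetD board i []) (some 0) (some 4)))
  (new_board, validity)

-- ===== PRECONDITION & SPEC =====
-- exactly the inputs on which A returns: at least 4 rows, the first 4 rows of length ≥ 4
-- (on anything smaller board[i][j] raises IndexError)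
def Pre_compress_right (board : List (List Int)) : Prop :=
  4 ≤ board.length ∧ ∀ r ∈ board.take 4, 4 ≤ r.length
instance (board : List (List Int)) : Decidable (Pre_compress_right board) := by
  unfold Pre_compress_right; infer_instance

def pvWitness_compress_right : List (List Int) :=
  ([[0, 2, 0, 2], [2, 0, 0, 0], [0, 0, 0, 0], [2, 4, 8, 16]])

def Spec_compress_right (board : List (List Int)) (out : List (List Int) × Bool) : Prop :=
  out = compress_right_alt board
instance (board : List (List Int)) (out : List (List Int) × Bool) :
    Decidable (Spec_compress_right board out) := by unfold Spec_compress_right; infer_instance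

-- ===== CLAIM (what is proved, stated in full; the proofs are below) =====
def Claim_equal_compress_right : Prop :=
  ∀ (board : List (List Int)), Dom_compress_right board → Pre_compress_right board →
    Spec_compress_right board (compress_right board)

-- ===== LEMMAS AND PROOFS =====

-- row-level version of stepA: state = (the row being built, position, validity)
def stepRow (orig : List Int) (st : List Int × Int × Bool) (j : Int) : List Int × Int × Bool :=
  let v := PySem.List.pyGetD orig j 0
  if v ≠ 0 then (PySem.List.pySetD st.1 st.2.1 v, st.2.1 - 1, if j ≠ st.2.1 then true else st.2.2)
  else st

-- the nb-level inner loop only rewrites row i: it is the row-level loop on nb[i], written back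
lemma factor (board : List (List Int)) (i : Int) (hi : 0 ≤ i) (orig : List Int)
    (horig : PySem.List.pyGetD board i [] = orig) (js : List Int) :
    ∀ (nb : List (List Int)) (hl : i.toNat < nb.length) (pos : Int) (v : Bool),
    js.foldl (stepA board i) (nb, pos, v)
      = ((nb.set i.toNat (js.foldl (stepRow orig) (nb[i.toNat]'hl, pos, v)).1),
         (js.foldl (stepRow orig) (nb[i.toNat]'hl, pos, v)).2) := by
  induction js with
  | nil => intro nb hl pos v; simp [List.set_getElem_self hl]
  | cons j js ih =>
    intro nb hl pos v
    have hgetnb : PySem.List.pyGetD nb i [] = nb[i.toNat]'hl := by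
      rw [PySem.List.pyGetD_eq_getElem _ _ hi (by omega)]
    simp only [List.foldl_cons, stepA, stepRow, horig, hgetnb,
      PySem.List.pySetD_of_nonneg nb _ hi]
    by_cases hz : PySem.List.pyGetD orig j 0 = 0
    · simp only [hz, ne_eq, not_true_eq_false, if_false]
      exact ih nb hl pos v
    · simp only [hz, ne_eq, not_false_eq_true, if_true]
      rw [ih (nb.set i.toNat _) (by simpa using hl) _ _]
      simp [List.set_set]

lemma step_eval (orig : List Int) (j : Int) (r : List Int) (p : Int) (v : Bool) :
    stepRow orig (r, p, v) j
      = if PySem.List.pyGetD orig j 0 = 0 then (r, p, v)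
        else (PySem.List.pySetD r p (PySem.List.pyGetD orig j 0), p - 1,
              if j ≠ p then true else v) := by
  simp only [stepRow]; split_ifs with h1 h2 <;> simp_all

-- the row-level loop computes B's compressed row, and its flag is B's row comparison
set_option maxHeartbeats 12000000 in
lemma rowfold (a b c d : Int) (t : List Int) (v : Bool) :
    ((([3, 2, 1, 0] : List Int).foldl (stepRow (a :: b :: c :: d :: t)) ([0, 0, 0, 0], 3, v)).1
        = altRow (a :: b :: c :: d :: t))
    ∧ ((([3, 2, 1, 0] : List Int).foldl (stepRow (a :: b :: c :: d :: t)) ([0, 0, 0, 0], 3, v)).2.2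
        = (v || !decide (altRow (a :: b :: c :: d :: t) = [a, b, c, d]))) := by
  have e3 : ∀ w x y z : Int, PySem.List.pyGetD (w :: x :: y :: z :: t) 3 0 = z := by
    intro w x y z
    rw [PySem.List.pyGetD_eq_getElem _ _ (by omega) (by simp only [List.length_cons]; omega)]; rfl
  have e2 : ∀ w x y z : Int, PySem.List.pyGetD (w :: x :: y :: z :: t) 2 0 = y := by
    intro w x y z
    rw [PySem.List.pyGetD_eq_getElem _ _ (by omega) (by simp only [List.length_cons]; omega)]; rfl
  have e1 : ∀ w x y z : Int, PySem.List.pyGetD (w :: x :: y :: z :: t) 1 0 = x := by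
    intro w x y z
    rw [PySem.List.pyGetD_eq_getElem _ _ (by omega) (by simp only [List.length_cons]; omega)]; rfl
  have e0 : ∀ w x y z : Int, PySem.List.pyGetD (w :: x :: y :: z :: t) 0 0 = w := by
    intro w x y z
    rw [PySem.List.pyGetD_eq_getElem _ _ (by omega) (by simp only [List.length_cons]; omega)]; rfl
  have hs3 : ∀ x0 x1 x2 x3 w : Int, PySem.List.pySetD [x0, x1, x2, x3] 3 w = [x0, x1, x2, w] := by
    intro _ _ _ _ _; rw [PySem.List.pySetD_of_nonneg _ _ (by omega)]; rfl
  have hs2 : ∀ x0 x1 x2 x3 w : Int, PySem.List.pySetD [x0, x1, x2, x3] 2 w = [x0, x1, w, x3] := by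
    intro _ _ _ _ _; rw [PySem.List.pySetD_of_nonneg _ _ (by omega)]; rfl
  have hs1 : ∀ x0 x1 x2 x3 w : Int, PySem.List.pySetD [x0, x1, x2, x3] 1 w = [x0, w, x2, x3] := by
    intro _ _ _ _ _; rw [PySem.List.pySetD_of_nonneg _ _ (by omega)]; rfl
  have hs0 : ∀ x0 x1 x2 x3 w : Int, PySem.List.pySetD [x0, x1, x2, x3] 0 w = [w, x1, x2, x3] := by
    intro _ _ _ _ _; rw [PySem.List.pySetD_of_nonneg _ _ (by omega)]; rfl
  have hsl : ∀ w x y z : Int, PySem.List.slice (w :: x :: y :: z :: t) (some 0) (some 4) = [w, x, y, z] := by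
    intro _ _ _ _; rw [PySem.List.slice_zero_start, PySem.List.slice_to _ (by omega)]; rfl
  by_cases hd : d = 0 <;> by_cases hc : c = 0 <;> by_cases hb : b = 0 <;> by_cases ha : a = 0 <;>
    simp [step_eval, e3, e2, e1, e0, ha, hb, hc, hd] <;>
    simp [altRow, hsl, hs3, hs2, hs1, hs0, PySem.List.len_eq, ha, hb, hc, hd]

-- A's inner loop on a row of length ≥ 4: replaces row i of nb by B's compressed row, and ORs
-- into validity whether that row differs from the original first 4 entries
lemma rowA_eq (board : List (List Int)) (i : Int) (hi : 0 ≤ i) (nb : List (List Int))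
    (hilen : i.toNat < nb.length) (a b c d : Int) (t : List Int)
    (horig : PySem.List.pyGetD board i [] = a :: b :: c :: d :: t)
    (hrow : nb[i.toNat]'hilen = ([0, 0, 0, 0] : List Int)) (v : Bool) :
    innerA board i nb v
      = (nb.set i.toNat (altRow (a :: b :: c :: d :: t)),
         v || !decide (altRow (a :: b :: c :: d :: t) = [a, b, c, d])) := by
  have hr : PySem.List.pyRange 3 (-1) (-1) = [3, 2, 1, 0] := by decide
  simp only [innerA, hr]
  rw [factor board i hi _ horig _ nb hilen 3 v]
  rw [hrow]
  obtain ⟨h1, h2⟩ := rowfold a b c d t v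
  rw [h1, h2]

-- ===== VERDICT (by name: the statement is the Claim_ definition above) =====
set_option maxHeartbeats 4000000 in
theorem compress_right_spec : Claim_equal_compress_right := by
  intro board _ hpre
  obtain ⟨hlen, hrows⟩ := hpre
  rcases board with _ | ⟨r0, board⟩; · simp at hlen
  rcases board with _ | ⟨r1, board⟩; · simp at hlen
  rcases board with _ | ⟨r2, board⟩; · simp at hlen
  rcases board with _ | ⟨r3, rest⟩; · simp at hlen
  have h0 : 4 ≤ r0.length := hrows r0 (by simp)
  have h1 : 4 ≤ r1.length := hrows r1 (by simp)
  have h2 : 4 ≤ r2.length := hrows r2 (by simp)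
  have h3 : 4 ≤ r3.length := hrows r3 (by simp)
  obtain ⟨a0, b0, c0, d0, t0, rfl⟩ : ∃ a b c d t, r0 = a :: b :: c :: d :: t := by
    rcases r0 with _ | ⟨a, _ | ⟨b, _ | ⟨c, _ | ⟨d, t⟩⟩⟩⟩ <;> first | exact ⟨_, _, _, _, _, rfl⟩ | simp at h0 h1 h2 h3
  obtain ⟨a1, b1, c1, d1, t1, rfl⟩ : ∃ a b c d t, r1 = a :: b :: c :: d :: t := by
    rcases r1 with _ | ⟨a, _ | ⟨b, _ | ⟨c, _ | ⟨d, t⟩⟩⟩⟩ <;> first | exact ⟨_, _, _, _, _, rfl⟩ | simp at h0 h1 h2 h3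
  obtain ⟨a2, b2, c2, d2, t2, rfl⟩ : ∃ a b c d t, r2 = a :: b :: c :: d :: t := by
    rcases r2 with _ | ⟨a, _ | ⟨b, _ | ⟨c, _ | ⟨d, t⟩⟩⟩⟩ <;> first | exact ⟨_, _, _, _, _, rfl⟩ | simp at h0 h1 h2 h3
  obtain ⟨a3, b3, c3, d3, t3, rfl⟩ : ∃ a b c d t, r3 = a :: b :: c :: d :: t := by
    rcases r3 with _ | ⟨a, _ | ⟨b, _ | ⟨c, _ | ⟨d, t⟩⟩⟩⟩ <;> first | exact ⟨_, _, _, _, _, rfl⟩ | simp at h0 h1 h2 h3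
  unfold Spec_compress_right
  have hr : PySem.List.pyRange 0 4 1 = [0, 1, 2, 3] := by decide
  have g0 : PySem.List.pyGetD
      ((a0::b0::c0::d0::t0) :: (a1::b1::c1::d1::t1) :: (a2::b2::c2::d2::t2) :: (a3::b3::c3::d3::t3) :: rest) 0 []
      = a0::b0::c0::d0::t0 := by
    rw [PySem.List.pyGetD_eq_getElem _ _ (by omega) (by simp only [List.length_cons]; omega)]
    rfl
  have g1 : PySem.List.pyGetD
      ((a0::b0::c0::d0::t0) :: (a1::b1::c1::d1::t1) :: (a2::b2::c2::d2::t2) :: (a3::b3::c3::d3::t3) :: rest) 1 []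
      = a1::b1::c1::d1::t1 := by
    rw [PySem.List.pyGetD_eq_getElem _ _ (by omega) (by simp only [List.length_cons]; omega)]
    rfl
  have g2 : PySem.List.pyGetD
      ((a0::b0::c0::d0::t0) :: (a1::b1::c1::d1::t1) :: (a2::b2::c2::d2::t2) :: (a3::b3::c3::d3::t3) :: rest) 2 []
      = a2::b2::c2::d2::t2 := by
    rw [PySem.List.pyGetD_eq_getElem _ _ (by omega) (by simp only [List.length_cons]; omega)]
    rfl
  have g3 : PySem.List.pyGetD
      ((a0::b0::c0::d0::t0) :: (a1::b1::c1::d1::t1) :: (a2::b2::c2::d2::t2) :: (a3::b3::c3::d3::t3) :: rest) 3 []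
      = a3::b3::c3::d3::t3 := by
    rw [PySem.List.pyGetD_eq_getElem _ _ (by omega) (by simp only [List.length_cons]; omega)]
    rfl
  have n0 : ∀ w x y z : List Int, PySem.List.pyGetD [w, x, y, z] 0 [] = w := by
    intro _ _ _ _
    rw [PySem.List.pyGetD_eq_getElem _ _ (by omega) (by simp only [List.length_cons, List.length_nil]; omega)]; rfl
  have n1 : ∀ w x y z : List Int, PySem.List.pyGetD [w, x, y, z] 1 [] = x := by
    intro _ _ _ _
    rw [PySem.List.pyGetD_eq_getElem _ _ (by omega) (by simp only [List.length_cons, List.length_nil]; omega)]; rfl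
  have n2 : ∀ w x y z : List Int, PySem.List.pyGetD [w, x, y, z] 2 [] = y := by
    intro _ _ _ _
    rw [PySem.List.pyGetD_eq_getElem _ _ (by omega) (by simp only [List.length_cons, List.length_nil]; omega)]; rfl
  have n3 : ∀ w x y z : List Int, PySem.List.pyGetD [w, x, y, z] 3 [] = z := by
    intro _ _ _ _
    rw [PySem.List.pyGetD_eq_getElem _ _ (by omega) (by simp only [List.length_cons, List.length_nil]; omega)]; rfl
  have hsl0 : PySem.List.slice (a0::b0::c0::d0::t0) (some 0) (some 4) = [a0, b0, c0, d0] := by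
    rw [PySem.List.slice_zero_start, PySem.List.slice_to _ (by omega)]; rfl
  have hsl1 : PySem.List.slice (a1::b1::c1::d1::t1) (some 0) (some 4) = [a1, b1, c1, d1] := by
    rw [PySem.List.slice_zero_start, PySem.List.slice_to _ (by omega)]; rfl
  have hsl2 : PySem.List.slice (a2::b2::c2::d2::t2) (some 0) (some 4) = [a2, b2, c2, d2] := by
    rw [PySem.List.slice_zero_start, PySem.List.slice_to _ (by omega)]; rfl
  have hsl3 : PySem.List.slice (a3::b3::c3::d3::t3) (some 0) (some 4) = [a3, b3, c3, d3] := by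
    rw [PySem.List.slice_zero_start, PySem.List.slice_to _ (by omega)]; rfl
  have s0 := rowA_eq _ 0 (by omega) [[0,0,0,0],[0,0,0,0],[0,0,0,0],[0,0,0,0]] (by simp)
    a0 b0 c0 d0 t0 g0 rfl false
  have s1 := rowA_eq _ 1 (by omega)
    ([([0,0,0,0] : List Int),[0,0,0,0],[0,0,0,0],[0,0,0,0]].set (0:Int).toNat (altRow (a0::b0::c0::d0::t0)))
    (by simp) a1 b1 c1 d1 t1 g1 rfl (false || !decide (altRow (a0::b0::c0::d0::t0) = [a0, b0, c0, d0]))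
  have s2 := rowA_eq _ 2 (by omega)
    (([([0,0,0,0] : List Int),[0,0,0,0],[0,0,0,0],[0,0,0,0]].set (0:Int).toNat (altRow (a0::b0::c0::d0::t0))).set
      (1:Int).toNat (altRow (a1::b1::c1::d1::t1)))
    (by simp) a2 b2 c2 d2 t2 g2 rfl
    (false || !decide (altRow (a0::b0::c0::d0::t0) = [a0, b0, c0, d0])
      || !decide (altRow (a1::b1::c1::d1::t1) = [a1, b1, c1, d1]))
  have s3 := rowA_eq _ 3 (by omega)
    ((([([0,0,0,0] : List Int),[0,0,0,0],[0,0,0,0],[0,0,0,0]].set (0:Int).toNat (altRow (a0::b0::c0::d0::t0))).set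
      (1:Int).toNat (altRow (a1::b1::c1::d1::t1))).set (2:Int).toNat (altRow (a2::b2::c2::d2::t2)))
    (by simp) a3 b3 c3 d3 t3 g3 rfl
    (false || !decide (altRow (a0::b0::c0::d0::t0) = [a0, b0, c0, d0])
      || !decide (altRow (a1::b1::c1::d1::t1) = [a1, b1, c1, d1])
      || !decide (altRow (a2::b2::c2::d2::t2) = [a2, b2, c2, d2]))
  simp only [compress_right, hr, List.foldl_cons, List.foldl_nil, s0, s1, s2, s3,
    compress_right_alt, List.map_cons, List.map_nil, List.any_cons, List.any_nil,
    g0, g1, g2, g3, n0, n1, n2, n3, hsl0, hsl1, hsl2, hsl3]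
  simp [Bool.or_assoc]
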